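-- pv_equiv track=rewrite | github.com/zeniverse/-algorithm-practice | Programmers/Level1/대충 만든 자판.py | solution
-- ===== SOURCE A (Python) =====
-- from collections import defaultdict
--
-- def solution(keymap, targets):
--     res = []
--     dic = defaultdict(list)
--
--     for i in range(len(keymap)):
--         for j in range(len(keymap[i])):
--             dic[keymap[i][j]].append(j + 1)
--
--     for k, v in dic.items():
--         v.sort()
--
--     for target in targets:
--         ans = 0
--         flag = False
--         for word in target:
--             if not dic[word]:
--                 res.append(-1)
--                 flag = True
--                 break
--             else:
--                 ans += dic[word][0]
--         if not flag:
--             res.append(ans)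
--
--     return res
-- ===== SOURCE B (Python) =====
-- def solution(keymap, targets):
--     def first_pos(row, ch):
--         # 1-based position of ch's first occurrence in row, or None
--         for i, c in enumerate(row):
--             if c == ch:
--                 return i + 1
--         return None
--
--     res = []
--     for target in targets:
--         ans = 0
--         for ch in target:
--             best = None
--             for row in keymap:
--                 p = first_pos(row, ch)
--                 if p is not None and (best is None or p < best):
--                     best = p
--             if best is None:
--                 ans = -1
--                 break
--             ans += best
--         res.append(ans)
--     return res
-- ===== Notes on version B (the rewrite author's own statement) =====
-- stated objective: simpler
-- what changed: B drops A's precomputed char->sorted-positions defaultdict entirely and, for each target character, scans the keymap rows directly keeping a running minimum of the 1-based first-occurrence positions (-1 and break on a miss).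
import Mathlib
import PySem

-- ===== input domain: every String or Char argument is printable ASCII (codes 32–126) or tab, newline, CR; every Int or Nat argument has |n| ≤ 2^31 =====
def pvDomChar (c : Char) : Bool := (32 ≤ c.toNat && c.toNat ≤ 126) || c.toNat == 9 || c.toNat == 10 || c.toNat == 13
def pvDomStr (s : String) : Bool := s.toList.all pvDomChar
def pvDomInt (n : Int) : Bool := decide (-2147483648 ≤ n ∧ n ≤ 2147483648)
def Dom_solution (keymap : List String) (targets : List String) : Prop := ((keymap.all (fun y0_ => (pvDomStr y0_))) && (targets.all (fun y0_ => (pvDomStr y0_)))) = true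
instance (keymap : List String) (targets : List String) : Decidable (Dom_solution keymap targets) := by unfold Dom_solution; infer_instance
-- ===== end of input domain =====

-- B drops A's precomputed char→sorted-positions dict and scans the keymap rows directly
-- per target character with a running minimum; objective: simpler (no measured speed claim).

-- ===== PORT A =====
-- dic: for i in range(len(keymap)): for j in range(len(keymap[i])): dic[keymap[i][j]].append(j+1)
def buildDic (keymap : List String) : PySem.Dict Char (List Int) :=
  keymap.foldl (fun d row =>
    (PySem.List.enumerate row.toList 0).foldl
      (fun d p => d.modify p.2 [] (fun v => v ++ [p.1 + 1])) d)
    PySem.Dict.empty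

-- for k, v in dic.items(): v.sort()   (in-place sort of every value)
def sortDic (d : PySem.Dict Char (List Int)) : PySem.Dict Char (List Int) :=
  PySem.Dict.mk (d.items.map (fun kv => (kv.1, PySem.List.sorted kv.2 (fun x => x) false)))

def solution (keymap : List String) (targets : List String) : List Int :=
  let dic := sortDic (buildDic keymap)
  targets.foldl (fun res target =>
    let st := target.toList.foldl
      (fun (st : Int × Bool × List Int) word =>
        if st.2.1 then st   -- after `break`, the remaining characters do nothing
        else if (PySem.Dict.getD dic word []) = [] then (st.1, true, st.2.2 ++ [-1])
        else (st.1 + (PySem.Dict.getD dic word []).headD 0, st.2.1, st.2.2))  -- v[0]; v nonempty here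
      (0, false, res)
    if st.2.1 then st.2.2 else st.2.2 ++ [st.1]) []

-- ===== PORT B =====
-- first_pos(row, ch): for i, c in enumerate(row): if c == ch: return i + 1; return None
def firstPos : List Char → Char → Int → Option Int
  | [], _, _ => none
  | c :: cs, ch, i => if c = ch then some (i + 1) else firstPos cs ch (i + 1)

-- inner `for row in keymap` loop with the running minimum `best`
def bestPos (keymap : List String) (ch : Char) : Option Int :=
  keymap.foldl (fun best row =>
    match firstPos row.toList ch 0 with
    | none => best
    | some p =>
      match best with
      | none => some p
      | some b => if p < b then some p else best) none

-- `for ch in target` loop: ans = -1 and break on a miss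
def goB (keymap : List String) : List Char → Int → Int
  | [], ans => ans
  | ch :: cs, ans =>
    match bestPos keymap ch with
    | none => -1
    | some b => goB keymap cs (ans + b)

def solution_alt (keymap : List String) (targets : List String) : List Int :=
  targets.foldl (fun res target => res ++ [goB keymap target.toList 0]) []

-- ===== PRECONDITION & SPEC =====
def Spec_solution (keymap : List String) (targets : List String) (out : List Int) : Prop := out = solution_alt keymap targets
instance (keymap : List String) (targets : List String) (out : List Int) : Decidable (Spec_solution keymap targets out) := by unfold Spec_solution; infer_instance

-- ===== CLAIM (what is proved, stated in full; the proofs are below) =====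
def Claim_equal_solution : Prop := ∀ (keymap : List String) (targets : List String), Dom_solution keymap targets → Spec_solution keymap targets (solution keymap targets)

-- ===== LEMMAS AND PROOFS =====

-- the (j+1)-positions of c in row, indices starting at s (the list A's dict accumulates)
def posIn (row : List Char) (c : Char) (s : Int) : List Int :=
  ((PySem.List.enumerate row s).filter (fun p => p.2 == c)).map (fun p => p.1 + 1)

def posAll (keymap : List String) (c : Char) : List Int :=
  keymap.flatMap (fun row => posIn row.toList c 0)

lemma inner_fold_getD (row : List Char) (d : PySem.Dict Char (List Int)) (c : Char) :
    ((PySem.List.enumerate row 0).foldl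
      (fun d p => d.modify p.2 [] (fun v => v ++ [p.1 + 1])) d).getD c []
    = d.getD c [] ++ posIn row c 0 := by
  have h : ((PySem.List.enumerate row 0).foldl
      (fun d p => d.modify p.2 [] (fun v => v ++ [p.1 + 1])) d)
      = (((PySem.List.enumerate row 0).map (fun p => (p.2, p.1 + 1))).foldl
        (fun d q => d.modify q.1 [] (fun v => v ++ [q.2])) d) := by
    rw [List.foldl_map]
  rw [h, PySem.Dict.getD_foldl_modify_append, posIn, List.filter_map, List.map_map]
  rfl

lemma buildDic_getD (keymap : List String) (c : Char) :
    (buildDic keymap).getD c [] = posAll keymap c := by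
  have main : ∀ (l : List String) (d : PySem.Dict Char (List Int)),
      (l.foldl (fun d row => (PySem.List.enumerate row.toList 0).foldl
        (fun d p => d.modify p.2 [] (fun v => v ++ [p.1 + 1])) d) d).getD c []
      = d.getD c [] ++ l.flatMap (fun row => posIn row.toList c 0) := by
    intro l
    induction l with
    | nil => intro d; simp
    | cons row l ih =>
      intro d
      rw [List.foldl_cons, ih, inner_fold_getD, List.flatMap_cons, List.append_assoc]
  rw [buildDic, main, PySem.Dict.getD_empty, List.nil_append, posAll]

lemma sortDic_getD (d : PySem.Dict Char (List Int)) (c : Char) :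
    (sortDic d).getD c [] = PySem.List.sorted (d.getD c []) (fun x => x) false := by
  have main : ∀ (l : List (Char × List Int)),
      (PySem.Dict.mk (l.map (fun kv => (kv.1, PySem.List.sorted kv.2 (fun x => x) false)))).getD c []
      = PySem.List.sorted ((PySem.Dict.mk l).getD c []) (fun x => x) false := by
    intro l
    induction l with
    | nil => rfl
    | cons kv rest ih =>
      obtain ⟨k, v⟩ := kv
      by_cases hk : k = c
      · subst hk
        simp [PySem.Dict.getD_eq_get?_getD, PySem.Dict.get?_mk_cons]
      · simp only [List.map_cons, PySem.Dict.getD_eq_get?_getD, PySem.Dict.get?_mk_cons] at *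
        simp only [beq_iff_eq, hk, if_false] at *
        exact ih
  have hd : PySem.Dict.mk d.items = d := PySem.Dict.ext rfl
  rw [sortDic, main d.items, hd]

lemma firstPos_eq (cs : List Char) (ch : Char) :
    ∀ i : Int, firstPos cs ch i = (PySem.List.index? cs ch).map (fun k => i + k + 1) := by
  induction cs with
  | nil => intro i; rfl
  | cons c cs ih =>
    intro i
    by_cases h : c = ch
    · subst h; rw [PySem.List.index?_cons_self]; simp [firstPos]
    · rw [PySem.List.index?_cons_of_ne _ h]
      simp only [firstPos, h, if_false, ih (i + 1)]
      cases PySem.List.index? cs ch with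
      | none => rfl
      | some k => simp; ring

lemma mem_posIn_lb (row : List Char) (c : Char) (s : Int) :
    ∀ x ∈ posIn row c s, s + 1 ≤ x := by
  intro x hx
  simp only [posIn, List.mem_map, List.mem_filter] at hx
  obtain ⟨p, ⟨hp, _⟩, rfl⟩ := hx
  rw [PySem.List.mem_enumerate_iff] at hp
  obtain ⟨k, hk, rfl⟩ := hp
  simp only
  omega

lemma posIn_eq_nil_iff (row : List Char) (c : Char) (s : Int) :
    posIn row c s = [] ↔ c ∉ row := by
  simp only [posIn, List.map_eq_nil_iff, List.filter_eq_nil_iff]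
  constructor
  · intro h hc
    obtain ⟨k, hk, hck⟩ := List.mem_iff_getElem.mp hc
    have := h _ ((PySem.List.mem_enumerate_iff row s (s + k, row[k])).mpr ⟨k, hk, rfl⟩)
    simp [hck] at this
  · intro h p hp
    rw [PySem.List.mem_enumerate_iff] at hp
    obtain ⟨k, hk, rfl⟩ := hp
    simp only [beq_iff_eq]
    intro hc
    exact h (hc ▸ List.getElem_mem hk)

-- per-row: either c is absent, or posIn starts with the first-occurrence position and it is minimal
lemma row_cases (row : List Char) (c : Char) :
    (firstPos row c 0 = none ∧ posIn row c 0 = []) ∨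
    (∃ p rest, firstPos row c 0 = some p ∧ posIn row c 0 = p :: rest ∧ ∀ x ∈ rest, p ≤ x) := by
  rcases h : PySem.List.index? row c with _ | k
  · left
    refine ⟨by rw [firstPos_eq, h]; rfl, ?_⟩
    exact (posIn_eq_nil_iff row c 0).mpr ((PySem.List.index?_eq_none_iff row c).mp h)
  · right
    obtain ⟨pre, suf, rfl, hlen, hpre⟩ := (PySem.List.index?_eq_some_iff _ _ _).mp h
    refine ⟨(k : Int) + 1, posIn suf c ((k : Int) + 1), by rw [firstPos_eq, h]; simp, ?_, ?_⟩
    · rw [posIn, PySem.List.enumerate_append, List.filter_append, PySem.List.enumerate_cons]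
      have hpf : (PySem.List.enumerate pre 0).filter (fun p => p.2 == c) = [] := by
        rw [List.filter_eq_nil_iff]
        intro p hp
        rw [PySem.List.mem_enumerate_iff] at hp
        obtain ⟨j, hj, rfl⟩ := hp
        simp only [beq_iff_eq]
        intro hc
        exact hpre (hc ▸ List.getElem_mem hj)
      rw [hpf]
      simp only [List.nil_append, List.filter_cons, beq_self_eq_true, if_true, List.map_cons]
      rw [posIn, hlen]
      norm_num
    · intro x hx
      have := mem_posIn_lb suf c ((k : Int) + 1) x hx
      omega

def cands (keymap : List String) (c : Char) : List Int :=
  keymap.filterMap (fun row => firstPos row.toList c 0)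

lemma bestPos_eq (keymap : List String) (c : Char) :
    bestPos keymap c = match cands keymap c with
      | [] => none
      | v :: vs => some (vs.foldl min v) := by
  have main : ∀ (l : List String) (acc : Option Int),
      l.foldl (fun best row =>
        match firstPos row.toList c 0 with
        | none => best
        | some p =>
          match best with
          | none => some p
          | some b => if p < b then some p else best) acc
      = match acc with
        | none => (match l.filterMap (fun row => firstPos row.toList c 0) with
            | [] => none
            | v :: vs => some (vs.foldl min v))
        | some b => some ((l.filterMap (fun row => firstPos row.toList c 0)).foldl min b) := by
    intro l
    induction l with
    | nil => intro acc; cases acc <;> rfl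
    | cons row l ih =>
      intro acc
      simp only [List.foldl_cons, List.filterMap_cons]
      rcases hf : firstPos row.toList c 0 with _ | p
      · cases acc <;> simp [ih]
      · cases acc with
        | none => simp [ih (some p)]
        | some b =>
          rcases lt_or_ge p b with hlt | hge
          · simp only [hlt, if_true, ih (some p)]
            rw [List.foldl_cons, min_eq_right (le_of_lt hlt)]
          · simp only [not_lt.mpr hge, if_false, ih (some b)]
            rw [List.foldl_cons, min_eq_left hge]
  rw [bestPos, main keymap none]; rfl

lemma posAll_nil_iff (keymap : List String) (c : Char) :
    posAll keymap c = [] ↔ cands keymap c = [] := by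
  rw [posAll, List.flatMap_eq_nil_iff, cands, List.filterMap_eq_nil_iff]
  constructor
  · intro h row hrow
    rcases row_cases row.toList c with ⟨h1, _⟩ | ⟨p, rest, hp, hpos, _⟩
    · exact h1
    · rw [h row hrow] at hpos; exact absurd hpos (by simp)
  · intro h row hrow
    rcases row_cases row.toList c with ⟨_, h2⟩ | ⟨p, rest, hp, _, _⟩
    · exact h2
    · rw [h row hrow] at hp; exact absurd hp (by simp)

lemma bestPos_none_iff (keymap : List String) (c : Char) :
    bestPos keymap c = none ↔ PySem.List.sorted (posAll keymap c) (fun x => x) false = [] := by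
  rw [PySem.List.sorted_eq_nil_iff, posAll_nil_iff, bestPos_eq]
  cases cands keymap c <;> simp

lemma bestPos_head (keymap : List String) (c : Char) (x : Int) (t : List Int)
    (h : PySem.List.sorted (posAll keymap c) (fun x => x) false = x :: t) :
    bestPos keymap c = some x := by
  have hperm := PySem.List.sorted_perm (posAll keymap c) (fun x => x) false
  have hpw := PySem.List.sorted_pairwise (posAll keymap c) (fun x => x)
  rw [h] at hperm hpw
  have hxmem : x ∈ posAll keymap c := hperm.subset (List.mem_cons_self)
  have hxmin : ∀ y ∈ posAll keymap c, x ≤ y := by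
    intro y hy
    rcases List.mem_cons.mp (hperm.symm.subset hy) with rfl | hyt
    · exact le_refl y
    · exact (List.pairwise_cons.mp hpw).1 y hyt
  have hne : cands keymap c ≠ [] := by
    intro hc
    have : posAll keymap c = [] := (posAll_nil_iff keymap c).mpr hc
    rw [this] at hperm
    exact absurd hperm.eq_nil (List.cons_ne_nil x t)
  rcases hc : cands keymap c with _ | ⟨v, vs⟩
  · exact absurd hc hne
  · rw [bestPos_eq, hc]
    have hble := PySem.List.foldl_min_le vs v
    have hbmem := PySem.List.foldl_min_mem vs v
    set b := vs.foldl min v with hb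
    -- b ∈ cands
    have hbc : b ∈ cands keymap c := by
      rw [hc]
      rcases hbmem with hbv | hbvs
      · rw [hbv]; exact List.mem_cons_self
      · exact List.mem_cons_of_mem _ hbvs
    -- b ∈ posAll, hence x ≤ b
    have hxb : x ≤ b := by
      obtain ⟨row, hrow, hfp⟩ := List.mem_filterMap.mp hbc
      rcases row_cases row.toList c with ⟨h1, _⟩ | ⟨p, rest, hp, hpos, _⟩
      · rw [h1] at hfp; exact absurd hfp (by simp)
      · rw [hp] at hfp
        obtain rfl : p = b := Option.some_injective _ hfp
        apply hxmin
        exact List.mem_flatMap.mpr ⟨row, hrow, hpos ▸ List.mem_cons_self⟩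
    -- x ∈ posAll → ∃ candidate p ≤ x, and b ≤ p
    have hbx : b ≤ x := by
      obtain ⟨row, hrow, hxpos⟩ := List.mem_flatMap.mp hxmem
      rcases row_cases row.toList c with ⟨_, h2⟩ | ⟨p, rest, hp, hpos, hrest⟩
      · rw [h2] at hxpos; exact absurd hxpos (by simp)
      · have hpx : p ≤ x := by
          rw [hpos] at hxpos
          rcases List.mem_cons.mp hxpos with rfl | hxr
          · exact le_refl x
          · exact hrest x hxr
        have hpc : p ∈ cands keymap c := List.mem_filterMap.mpr ⟨row, hrow, hp⟩
        rw [hc] at hpc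
        rcases List.mem_cons.mp hpc with rfl | hpvs
        · exact le_trans hble.1 hpx
        · exact le_trans (hble.2 p hpvs) hpx
    exact congrArg some (le_antisymm hbx hxb)

lemma inner_eq (keymap : List String) (cs : List Char) :
    ∀ (ans : Int) (res : List Int),
      (let st := cs.foldl
        (fun (st : Int × Bool × List Int) word =>
          if st.2.1 then st
          else if (PySem.Dict.getD (sortDic (buildDic keymap)) word []) = [] then (st.1, true, st.2.2 ++ [-1])
          else (st.1 + (PySem.Dict.getD (sortDic (buildDic keymap)) word []).headD 0, st.2.1, st.2.2))
        (ans, false, res)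
       if st.2.1 then st.2.2 else st.2.2 ++ [st.1]) = res ++ [goB keymap cs ans] := by
  have key : ∀ w, PySem.Dict.getD (sortDic (buildDic keymap)) w []
      = PySem.List.sorted (posAll keymap w) (fun x => x) false := by
    intro w; rw [sortDic_getD, buildDic_getD]
  have flag_true : ∀ (l : List Char) (a : Int) (r : List Int),
      l.foldl (fun (st : Int × Bool × List Int) word =>
        if st.2.1 then st
        else if (PySem.Dict.getD (sortDic (buildDic keymap)) word []) = [] then (st.1, true, st.2.2 ++ [-1])
        else (st.1 + (PySem.Dict.getD (sortDic (buildDic keymap)) word []).headD 0, st.2.1, st.2.2))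
        (a, true, r) = (a, true, r) := by
    intro l
    induction l with
    | nil => intro a r; rfl
    | cons w l ih => intro a r; rw [List.foldl_cons]; exact ih a r
  induction cs with
  | nil => intro ans res; rfl
  | cons ch cs ih =>
    intro ans res
    simp only [List.foldl_cons]
    rcases hs : PySem.List.sorted (posAll keymap ch) (fun x => x) false with _ | ⟨x, t⟩
    · have hcond : PySem.Dict.getD (sortDic (buildDic keymap)) ch [] = [] := by rw [key, hs]
      have hb : bestPos keymap ch = none := (bestPos_none_iff keymap ch).mpr hs
      simp only [Bool.false_eq_true, if_false, hcond, if_true]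
      rw [flag_true]
      simp [goB, hb]
    · have hcond : PySem.Dict.getD (sortDic (buildDic keymap)) ch [] = x :: t := by rw [key, hs]
      have hb := bestPos_head keymap ch x t hs
      simp only [Bool.false_eq_true, if_false, hcond, List.cons_ne_nil, List.headD_cons]
      rw [show goB keymap (ch :: cs) ans = goB keymap cs (ans + x) from by simp [goB, hb]]
      exact ih (ans + x) res

-- A's outer loop over targets appends, per target, exactly goB's value
lemma outer_eq (keymap : List String) (ts : List String) :
    ∀ res : List Int,
    ts.foldl (fun res target =>
      let st := target.toList.foldl
        (fun (st : Int × Bool × List Int) word =>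
          if st.2.1 then st
          else if (PySem.Dict.getD (sortDic (buildDic keymap)) word []) = [] then (st.1, true, st.2.2 ++ [-1])
          else (st.1 + (PySem.Dict.getD (sortDic (buildDic keymap)) word []).headD 0, st.2.1, st.2.2))
        (0, false, res)
      if st.2.1 then st.2.2 else st.2.2 ++ [st.1]) res
    = ts.foldl (fun res target => res ++ [goB keymap target.toList 0]) res := by
  induction ts with
  | nil => intro res; rfl
  | cons t ts ih =>
    intro res
    simp only [List.foldl_cons]
    rw [inner_eq keymap t.toList 0 res]
    exact ih _

-- ===== VERDICT (by name: the statement is the Claim_ definition above) =====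
theorem solution_spec : Claim_equal_solution := by
  intro keymap targets _
  show solution keymap targets = solution_alt keymap targets
  rw [solution, solution_alt]
  exact outer_eq keymap targets []
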